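-- pv_equiv track=rewrite | github.com/Srish0218/CredAPIpackage | resources/working_with_files.py | categorize_missing_columns
-- ===== SOURCE A (Python) =====
-- def categorize_missing_columns(missing_cols):
--     """Categorize missing columns into Sarcasm, Escalation, or Supervisor related."""
--     sarcasm_cols = {'Sarcasm_rude_behaviour', 'Sarcasm_rude_behaviour_evidence'}
--     escalation_cols = {'escalation_results', 'Issue_Identification', 'Probable_Reason_for_Escalation',
--                        'Probable_Reason_for_Escalation_Evidence', 'Agent_Handling_Capability'}
--     supervisor_cols = {'Wanted_to_connect_with_supervisor', 'de_escalate', 'Supervisor_call_connected',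
--                        'call_back_arranged_from_supervisor', 'supervisor_evidence', 'Denied_for_Supervisor_call',
--                        'denied_evidence'}
--
--     categories = []
--     if any(col in sarcasm_cols for col in missing_cols):
--         categories.append("Sarcasm")
--     if any(col in escalation_cols for col in missing_cols):
--         categories.append("Escalation")
--     if any(col in supervisor_cols for col in missing_cols):
--         categories.append("Supervisor")
--
--     return categories
-- ===== SOURCE B (Python) =====
-- def categorize_missing_columns(missing_cols):
--     """Categorize missing columns into Sarcasm, Escalation, or Supervisor related."""
--     table = {
--         'Sarcasm_rude_behaviour': 'Sarcasm',
--         'Sarcasm_rude_behaviour_evidence': 'Sarcasm',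
--         'escalation_results': 'Escalation',
--         'Issue_Identification': 'Escalation',
--         'Probable_Reason_for_Escalation': 'Escalation',
--         'Probable_Reason_for_Escalation_Evidence': 'Escalation',
--         'Agent_Handling_Capability': 'Escalation',
--         'Wanted_to_connect_with_supervisor': 'Supervisor',
--         'de_escalate': 'Supervisor',
--         'Supervisor_call_connected': 'Supervisor',
--         'call_back_arranged_from_supervisor': 'Supervisor',
--         'supervisor_evidence': 'Supervisor',
--         'Denied_for_Supervisor_call': 'Supervisor',
--         'denied_evidence': 'Supervisor',
--     }
--     seen = set()
--     for col in missing_cols: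
--         cat = table.get(col)
--         if cat is not None:
--             seen.add(cat)
--     return [c for c in ("Sarcasm", "Escalation", "Supervisor") if c in seen]
-- ===== Notes on version B (the rewrite author's own statement) =====
-- stated objective: faster
-- what changed: Replaces three separate any-scans over missing_cols (one per category set) with a single column-to-category lookup table, one pass collecting seen categories into a set, and a final emit in the fixed category order.
import Mathlib
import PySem

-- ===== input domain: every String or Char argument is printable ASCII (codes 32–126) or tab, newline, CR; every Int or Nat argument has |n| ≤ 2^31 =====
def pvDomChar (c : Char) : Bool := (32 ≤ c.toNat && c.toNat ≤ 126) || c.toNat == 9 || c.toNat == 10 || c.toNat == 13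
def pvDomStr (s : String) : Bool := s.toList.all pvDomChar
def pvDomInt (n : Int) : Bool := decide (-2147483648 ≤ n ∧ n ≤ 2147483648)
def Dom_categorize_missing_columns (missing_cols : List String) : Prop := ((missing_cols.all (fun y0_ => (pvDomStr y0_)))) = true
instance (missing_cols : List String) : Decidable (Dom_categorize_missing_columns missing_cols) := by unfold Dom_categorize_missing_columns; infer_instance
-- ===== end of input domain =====

-- B replaces A's three per-category any-scans by one lookup table, a single pass
-- collecting seen categories into a set, and an emit in the fixed category order (objective: faster, one pass instead of three).

-- ===== PORT A =====
def categorize_missing_columns (missing_cols : List String) : List String :=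
  let sarcasm_cols : PySem.Set String :=
    PySem.Set.ofList ["Sarcasm_rude_behaviour", "Sarcasm_rude_behaviour_evidence"]
  let escalation_cols : PySem.Set String :=
    PySem.Set.ofList ["escalation_results", "Issue_Identification", "Probable_Reason_for_Escalation",
      "Probable_Reason_for_Escalation_Evidence", "Agent_Handling_Capability"]
  let supervisor_cols : PySem.Set String :=
    PySem.Set.ofList ["Wanted_to_connect_with_supervisor", "de_escalate", "Supervisor_call_connected",
      "call_back_arranged_from_supervisor", "supervisor_evidence", "Denied_for_Supervisor_call",
      "denied_evidence"]
  let categories : List String := []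
  let categories := if missing_cols.any (fun col => PySem.Set.contains sarcasm_cols col)
    then categories ++ ["Sarcasm"] else categories
  let categories := if missing_cols.any (fun col => PySem.Set.contains escalation_cols col)
    then categories ++ ["Escalation"] else categories
  let categories := if missing_cols.any (fun col => PySem.Set.contains supervisor_cols col)
    then categories ++ ["Supervisor"] else categories
  categories

-- ===== PORT B =====
def pvTable : PySem.Dict String String := PySem.Dict.ofList
  [("Sarcasm_rude_behaviour", "Sarcasm"),
   ("Sarcasm_rude_behaviour_evidence", "Sarcasm"),
   ("escalation_results", "Escalation"),
   ("Issue_Identification", "Escalation"),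
   ("Probable_Reason_for_Escalation", "Escalation"),
   ("Probable_Reason_for_Escalation_Evidence", "Escalation"),
   ("Agent_Handling_Capability", "Escalation"),
   ("Wanted_to_connect_with_supervisor", "Supervisor"),
   ("de_escalate", "Supervisor"),
   ("Supervisor_call_connected", "Supervisor"),
   ("call_back_arranged_from_supervisor", "Supervisor"),
   ("supervisor_evidence", "Supervisor"),
   ("Denied_for_Supervisor_call", "Supervisor"),
   ("denied_evidence", "Supervisor")]

def categorize_missing_columns_alt (missing_cols : List String) : List String :=
  let seen : PySem.Set String := missing_cols.foldl
    (fun (s : PySem.Set String) col =>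
      match PySem.Dict.get? pvTable col with
      | some cat => PySem.Set.add s cat
      | none => s)
    PySem.Set.empty
  (["Sarcasm", "Escalation", "Supervisor"] : List String).filter
    (fun c => PySem.Set.contains seen c)

-- ===== PRECONDITION & SPEC =====
def Spec_categorize_missing_columns (missing_cols : List String) (out : List String) : Prop := out = categorize_missing_columns_alt missing_cols
instance (missing_cols : List String) (out : List String) : Decidable (Spec_categorize_missing_columns missing_cols out) := by unfold Spec_categorize_missing_columns; infer_instance

-- ===== CLAIM (what is proved, stated in full; the proofs are below) =====
def Claim_equal_categorize_missing_columns : Prop := ∀ (missing_cols : List String), Dom_categorize_missing_columns missing_cols → Spec_categorize_missing_columns missing_cols (categorize_missing_columns missing_cols)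

-- ===== LEMMAS AND PROOFS =====

-- membership in a set after adding one element
theorem pv_contains_add (s : PySem.Set String) (c x : String) :
    PySem.Set.contains (PySem.Set.add s c) x = (PySem.Set.contains s x || c == x) := by
  simp only [PySem.Set.add, PySem.Set.contains]
  split_ifs with hc <;> by_cases h : c = x <;> by_cases hs : x ∈ s <;> simp_all [Bool.beq_eq_decide_eq, decide_eq_decide, eq_comm]

-- the table lookup, characterised by the three key lists
theorem pv_lookup_eq (col : String) :
    PySem.Dict.get? pvTable col =
      (if (["Sarcasm_rude_behaviour", "Sarcasm_rude_behaviour_evidence"] : List String).contains col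
       then some "Sarcasm"
       else if (["escalation_results", "Issue_Identification", "Probable_Reason_for_Escalation",
          "Probable_Reason_for_Escalation_Evidence", "Agent_Handling_Capability"] : List String).contains col
       then some "Escalation"
       else if (["Wanted_to_connect_with_supervisor", "de_escalate", "Supervisor_call_connected",
          "call_back_arranged_from_supervisor", "supervisor_evidence", "Denied_for_Supervisor_call",
          "denied_evidence"] : List String).contains col
       then some "Supervisor"
       else none) := by
  by_cases hmem : col ∈ (["Sarcasm_rude_behaviour", "Sarcasm_rude_behaviour_evidence",
      "escalation_results", "Issue_Identification", "Probable_Reason_for_Escalation",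
      "Probable_Reason_for_Escalation_Evidence", "Agent_Handling_Capability",
      "Wanted_to_connect_with_supervisor", "de_escalate", "Supervisor_call_connected",
      "call_back_arranged_from_supervisor", "supervisor_evidence", "Denied_for_Supervisor_call",
      "denied_evidence"] : List String)
  · fin_cases hmem <;> decide
  · have hk : pvTable.keys = ["Sarcasm_rude_behaviour", "Sarcasm_rude_behaviour_evidence",
        "escalation_results", "Issue_Identification", "Probable_Reason_for_Escalation",
        "Probable_Reason_for_Escalation_Evidence", "Agent_Handling_Capability",
        "Wanted_to_connect_with_supervisor", "de_escalate", "Supervisor_call_connected",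
        "call_back_arranged_from_supervisor", "supervisor_evidence", "Denied_for_Supervisor_call",
        "denied_evidence"] := by decide
    have h1 : PySem.Dict.get? pvTable col = none := by
      rw [PySem.Dict.get?_eq_none_iff_not_mem_keys, hk]
      exact hmem
    simp only [List.mem_cons, List.not_mem_nil, or_false] at hmem
    push Not at hmem
    simp [h1, List.contains_eq_mem, hmem.1, hmem.2.1, hmem.2.2.1, hmem.2.2.2.1, hmem.2.2.2.2.1,
      hmem.2.2.2.2.2.1, hmem.2.2.2.2.2.2.1, hmem.2.2.2.2.2.2.2.1, hmem.2.2.2.2.2.2.2.2.1,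
      hmem.2.2.2.2.2.2.2.2.2.1, hmem.2.2.2.2.2.2.2.2.2.2.1, hmem.2.2.2.2.2.2.2.2.2.2.2.1,
      hmem.2.2.2.2.2.2.2.2.2.2.2.2.1, hmem.2.2.2.2.2.2.2.2.2.2.2.2.2]

-- the seen-set of B's loop contains a label iff some column looks it up
theorem pv_contains_loop (m : List String) (s : PySem.Set String) (x : String) :
    PySem.Set.contains
      (m.foldl (fun (s : PySem.Set String) col =>
        match PySem.Dict.get? pvTable col with
        | some cat => PySem.Set.add s cat
        | none => s) s) x
    = (PySem.Set.contains s x || m.any (fun col => PySem.Dict.get? pvTable col == some x)) := by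
  induction m generalizing s with
  | nil => simp
  | cons c t ih =>
      simp only [List.foldl_cons, List.any_cons, ih]
      cases h : PySem.Dict.get? pvTable c with
      | none => simp [h]
      | some cat =>
          simp [h, pv_contains_add, Bool.or_assoc, Bool.or_left_comm, Bool.beq_eq_decide_eq,
            decide_eq_decide, eq_comm]

-- Prop-level forms of the lookup characterisation
theorem pv_eqS (col : String) :
    PySem.Dict.get? pvTable col = some "Sarcasm" ↔
      (col = "Sarcasm_rude_behaviour" ∨ col = "Sarcasm_rude_behaviour_evidence") := by
  rw [pv_lookup_eq]; split_ifs with h1 h2 h3 <;> simp_all [List.contains_eq_mem]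

theorem pv_eqE (col : String) :
    PySem.Dict.get? pvTable col = some "Escalation" ↔
      (col = "escalation_results" ∨ col = "Issue_Identification" ∨
       col = "Probable_Reason_for_Escalation" ∨ col = "Probable_Reason_for_Escalation_Evidence" ∨
       col = "Agent_Handling_Capability") := by
  rw [pv_lookup_eq]; split_ifs with h1 h2 h3 <;> simp_all [List.contains_eq_mem]
  rcases h1 with h | h <;> subst h <;> decide

theorem pv_eqSu (col : String) :
    PySem.Dict.get? pvTable col = some "Supervisor" ↔
      (col = "Wanted_to_connect_with_supervisor" ∨ col = "de_escalate" ∨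
       col = "Supervisor_call_connected" ∨ col = "call_back_arranged_from_supervisor" ∨
       col = "supervisor_evidence" ∨ col = "Denied_for_Supervisor_call" ∨
       col = "denied_evidence") := by
  rw [pv_lookup_eq]; split_ifs with h1 h2 h3 <;> simp_all [List.contains_eq_mem]
  · rcases h1 with h | h <;> subst h <;> decide
  · rcases h2 with h | h | h | h | h <;> subst h <;> decide

-- membership in the seen-set after B's loop, Prop form
theorem pv_mem_loop (m : List String) (x : String) :
    x ∈ (m.foldl (fun (s : PySem.Set String) col =>
        match PySem.Dict.get? pvTable col with
        | some cat => PySem.Set.add s cat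
        | none => s) PySem.Set.empty) ↔
      ∃ col ∈ m, PySem.Dict.get? pvTable col = some x := by
  have h := pv_contains_loop m PySem.Set.empty x
  simp only [PySem.Set.contains, PySem.Set.empty] at h
  have h2 : (List.contains (m.foldl (fun (s : PySem.Set String) col =>
      match PySem.Dict.get? pvTable col with
      | some cat => PySem.Set.add s cat
      | none => s) []) x = true) ↔ ∃ col ∈ m, PySem.Dict.get? pvTable col = some x := by
    rw [h]; simp [List.any_eq_true, beq_iff_eq]
  simpa [List.contains_eq_mem] using h2

-- ===== VERDICT (by name: the statement is the Claim_ definition above) =====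
theorem categorize_missing_columns_spec : Claim_equal_categorize_missing_columns := by
  intro m _
  show categorize_missing_columns m = categorize_missing_columns_alt m
  unfold categorize_missing_columns categorize_missing_columns_alt
  simp only [List.filter, PySem.Set.contains, PySem.Set.ofList, List.contains_eq_mem,
    pv_mem_loop, pv_eqS, pv_eqE, pv_eqSu, List.any_eq_true, decide_eq_true_eq, List.mem_cons,
    List.not_mem_nil, or_false]
  by_cases h1 : (∃ x ∈ m, x = "Sarcasm_rude_behaviour" ∨ x = "Sarcasm_rude_behaviour_evidence") <;>
    by_cases h2 : (∃ x ∈ m, x = "escalation_results" ∨ x = "Issue_Identification" ∨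
      x = "Probable_Reason_for_Escalation" ∨ x = "Probable_Reason_for_Escalation_Evidence" ∨
      x = "Agent_Handling_Capability") <;>
    by_cases h3 : (∃ x ∈ m, x = "Wanted_to_connect_with_supervisor" ∨ x = "de_escalate" ∨
      x = "Supervisor_call_connected" ∨ x = "call_back_arranged_from_supervisor" ∨
      x = "supervisor_evidence" ∨ x = "Denied_for_Supervisor_call" ∨ x = "denied_evidence") <;>
    simp [h1, h2, h3]
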